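-- pv_equiv track=rewrite | github.com/SamuelGV2003/TareasChaconGomezVega | Tarea 1/tarea_1_example_solution.py | separa_letras
-- ===== SOURCE A (Python) =====
-- def separa_letras(cadena):
--     """
--     Separa una cadena en letras mayúsculas y minúsculas.
--     Devuelve un código de error/éxito y las dos cadenas resultantes.
--     """
--     # Verificar que el parámetro sea un string
--     if not isinstance(cadena, str):
--         return -100, None, None  # Código de error: No es un string
--
--     # Verificar que no sea un string vacío
--     if cadena.strip() == "":
--         return -300, None, None  # Código de error: String vacío
--
--     # Verificar que solo contenga letras del abecedario
--     if not cadena.isalpha():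
--         return -200, None, None
--     # El anterior es el Código de error: Tiene caracteres no alfabéticos
--
--     mayusculas = "".join([c for c in cadena if c.isupper()])
--     minusculas = "".join([c for c in cadena if c.islower()])
--
--     return 0, mayusculas, minusculas  # Código de éxito
-- ===== SOURCE B (Python) =====
-- def separa_letras(cadena):
--     if not isinstance(cadena, str):
--         return -100, None, None
--     if cadena.strip() == "":
--         return -300, None, None
--     if not cadena.isalpha():
--         return -200, None, None
--     mayusculas = []
--     minusculas = []
--     for c in cadena:
--         if c.isupper():
--             mayusculas.append(c)
--         elif c.islower():
--             minusculas.append(c)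
--     return 0, "".join(mayusculas), "".join(minusculas)
-- ===== Notes on version B (the rewrite author's own statement) =====
-- stated objective: alternative
-- what changed: Replaces the two separate comprehension scans (one filtering uppercase, one lowercase) with a single pass over the string maintaining two accumulator lists, joined once at the end.
import Mathlib
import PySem

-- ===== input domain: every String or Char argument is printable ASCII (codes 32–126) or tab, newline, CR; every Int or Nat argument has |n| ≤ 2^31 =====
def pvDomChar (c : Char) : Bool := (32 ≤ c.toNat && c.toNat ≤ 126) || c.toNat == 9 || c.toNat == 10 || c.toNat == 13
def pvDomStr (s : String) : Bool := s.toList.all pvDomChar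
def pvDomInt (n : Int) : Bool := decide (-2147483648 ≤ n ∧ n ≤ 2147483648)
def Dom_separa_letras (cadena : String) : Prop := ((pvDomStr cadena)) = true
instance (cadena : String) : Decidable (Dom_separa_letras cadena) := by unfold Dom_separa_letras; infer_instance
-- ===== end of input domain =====

-- B replaces A's two filtering comprehension passes with a single pass keeping two accumulators (alternative decomposition, same cost).


-- ===== PORT A =====
-- (the `isinstance(cadena, str)` guard is always true under the type convention, so its branch is unreachable)
def separa_letras (cadena : String) : Int × Option String × Option String :=
  if PySem.Str.strip cadena = "" then (-300, none, none)
  else if !(PySem.Str.strIsalpha cadena) then (-200, none, none)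
  else
    let mayusculas := PySem.Chars.join [] ((cadena.toList.filter (fun c => PySem.Chars.isupper c)).map (fun c => [c]))
    let minusculas := PySem.Chars.join [] ((cadena.toList.filter (fun c => PySem.Chars.islower c)).map (fun c => [c]))
    (0, some (String.ofList mayusculas), some (String.ofList minusculas))

-- ===== PORT B =====
def separa_letras_alt (cadena : String) : Int × Option String × Option String :=
  if PySem.Str.strip cadena = "" then (-300, none, none)
  else if !(PySem.Str.strIsalpha cadena) then (-200, none, none)
  else
    let acc := cadena.toList.foldl
      (fun (acc : List Char × List Char) c =>
        if PySem.Chars.isupper c then (acc.1 ++ [c], acc.2)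
        else if PySem.Chars.islower c then (acc.1, acc.2 ++ [c])
        else acc) ([], [])
    (0, some (String.ofList (PySem.Chars.join [] (acc.1.map (fun c => [c])))),
        some (String.ofList (PySem.Chars.join [] (acc.2.map (fun c => [c])))))

-- ===== PRECONDITION & SPEC =====
def Spec_separa_letras (cadena : String) (out : Int × Option String × Option String) : Prop := out = separa_letras_alt cadena
instance (cadena : String) (out : Int × Option String × Option String) : Decidable (Spec_separa_letras cadena out) := by unfold Spec_separa_letras; infer_instance

-- ===== CLAIM (what is proved, stated in full; the proofs are below) =====
def Claim_equal_separa_letras : Prop := ∀ (cadena : String), Dom_separa_letras cadena → Spec_separa_letras cadena (separa_letras cadena)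

-- ===== LEMMAS AND PROOFS =====

theorem lower_not_upper (c : Char) (h : PySem.Chars.islower c = true) :
    PySem.Chars.isupper c = false := by
  simp [PySem.Chars.islower, PySem.Chars.isupper, Char.le_def, UInt32.le_iff_toNat_le] at *
  intro h'
  omega

theorem foldl_two_acc (l : List Char) (a b : List Char) :
    l.foldl (fun (acc : List Char × List Char) c =>
        if PySem.Chars.isupper c then (acc.1 ++ [c], acc.2)
        else if PySem.Chars.islower c then (acc.1, acc.2 ++ [c])
        else acc) (a, b)
      = (a ++ l.filter (fun c => PySem.Chars.isupper c),
         b ++ l.filter (fun c => PySem.Chars.islower c)) := by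
  induction l generalizing a b with
  | nil => simp
  | cons c l ih =>
    by_cases hu : PySem.Chars.isupper c = true
    · simp [hu, lower_not_upper, ih, List.filter_cons]
      have : PySem.Chars.islower c = false := by
        by_contra h
        simp at h
        simp [lower_not_upper c h] at hu
      simp [this]
    · simp at hu
      by_cases hl : PySem.Chars.islower c = true
      · simp [hu, hl, ih]
      · simp at hl
        simp [hu, hl, ih]

-- ===== VERDICT (by name: the statement is the Claim_ definition above) =====
theorem separa_letras_spec : Claim_equal_separa_letras := by
  intro cadena _
  unfold Spec_separa_letras separa_letras separa_letras_alt
  split_ifs with h1 h2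
  · rfl
  · rfl
  · simp [foldl_two_acc]
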